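-- pv_equiv track=rewrite | github.com/DavidClawson/OpenScope-2C53T | scripts/decompile_init.py | pin_from_val
-- ===== SOURCE A (Python) =====
-- GPIO_PIN_NAMES = {
--     (0x40010800, 0x0001): "PA0",  (0x40010800, 0x0002): "PA1",
--     (0x40010800, 0x0004): "PA2",  (0x40010800, 0x0008): "PA3",
--     (0x40010800, 0x0010): "PA4",  (0x40010800, 0x0020): "PA5",
--     (0x40010800, 0x0040): "PA6",  (0x40010800, 0x0080): "PA7",
--     (0x40010800, 0x0100): "PA8",  (0x40010800, 0x0200): "PA9",
--     (0x40010800, 0x0400): "PA10", (0x40010800, 0x0800): "PA11",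
--     (0x40010800, 0x1000): "PA12", (0x40010800, 0x2000): "PA13",
--     (0x40010800, 0x4000): "PA14", (0x40010800, 0x8000): "PA15",
--     (0x40010C00, 0x0001): "PB0",  (0x40010C00, 0x0002): "PB1",
--     (0x40010C00, 0x0004): "PB2",  (0x40010C00, 0x0008): "PB3",
--     (0x40010C00, 0x0010): "PB4",  (0x40010C00, 0x0020): "PB5",
--     (0x40010C00, 0x0040): "PB6",  (0x40010C00, 0x0080): "PB7",
--     (0x40010C00, 0x0100): "PB8",  (0x40010C00, 0x0200): "PB9",
--     (0x40010C00, 0x0400): "PB10", (0x40010C00, 0x0800): "PB11",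
--     (0x40010C00, 0x1000): "PB12", (0x40010C00, 0x2000): "PB13",
--     (0x40010C00, 0x4000): "PB14", (0x40010C00, 0x8000): "PB15",
--     (0x40011000, 0x0001): "PC0",  (0x40011000, 0x0002): "PC1",
--     (0x40011000, 0x0004): "PC2",  (0x40011000, 0x0008): "PC3",
--     (0x40011000, 0x0010): "PC4",  (0x40011000, 0x0020): "PC5",
--     (0x40011000, 0x0040): "PC6",  (0x40011000, 0x0080): "PC7",
--     (0x40011000, 0x0100): "PC8",  (0x40011000, 0x0200): "PC9",
--     (0x40011000, 0x0400): "PC10", (0x40011000, 0x0800): "PC11",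
--     (0x40011000, 0x1000): "PC12", (0x40011000, 0x2000): "PC13",
--     (0x40011000, 0x4000): "PC14", (0x40011000, 0x8000): "PC15",
--     (0x40011400, 0x0001): "PD0",  (0x40011400, 0x0002): "PD1",
--     (0x40011400, 0x0004): "PD2",  (0x40011400, 0x0008): "PD3",
--     (0x40011400, 0x0010): "PD4",  (0x40011400, 0x0020): "PD5",
--     (0x40011400, 0x0040): "PD6",  (0x40011400, 0x0080): "PD7",
--     (0x40011400, 0x0100): "PD8",  (0x40011400, 0x0200): "PD9",
--     (0x40011400, 0x0400): "PD10", (0x40011400, 0x0800): "PD11",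
--     (0x40011400, 0x1000): "PD12", (0x40011400, 0x2000): "PD13",
--     (0x40011400, 0x4000): "PD14", (0x40011400, 0x8000): "PD15",
-- }
--
-- def pin_from_val(gpio_base, val):
--     """Identify GPIO pin from BOP/BC value."""
--     key = (gpio_base, val)
--     if key in GPIO_PIN_NAMES:
--         return GPIO_PIN_NAMES[key]
--     # Try to decode multi-pin
--     pins = []
--     for bit in range(16):
--         if val & (1 << bit):
--             k = (gpio_base, 1 << bit)
--             if k in GPIO_PIN_NAMES:
--                 pins.append(GPIO_PIN_NAMES[k])
--     return "|".join(pins) if pins else f"pin_mask=0x{val:04X}"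
-- ===== SOURCE B (Python) =====
-- GPIO_PORT_LETTERS = {0x40010800: "A", 0x40010C00: "B", 0x40011000: "C", 0x40011400: "D"}
--
-- def pin_from_val(gpio_base, val):
--     """Identify GPIO pin from BOP/BC value."""
--     letter = GPIO_PORT_LETTERS.get(gpio_base)
--     if letter is None:
--         return f"pin_mask=0x{val:04X}"
--
--     def go(rem, bit):
--         # recursion over the binary representation: strip one bit per step
--         if rem == 0:
--             return []
--         rest = go(rem >> 1, bit + 1)
--         return [f"P{letter}{bit}"] + rest if rem & 1 else rest
--
--     pins = go(val & 0xFFFF, 0)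
--     return "|".join(pins) if pins else f"pin_mask=0x{val:04X}"
-- ===== Notes on version B (the rewrite author's own statement) =====
-- stated objective: simpler
-- what changed: Replaces the 64-entry (base,mask)->name table, the exact-match fast path and the 16-step index loop with a 4-entry base->letter map (early fallback return when unknown) and a recursion over the binary representation of val & 0xFFFF that halves the remainder, strips one bit per step and builds the pin-name list back-to-front.
import Mathlib
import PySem

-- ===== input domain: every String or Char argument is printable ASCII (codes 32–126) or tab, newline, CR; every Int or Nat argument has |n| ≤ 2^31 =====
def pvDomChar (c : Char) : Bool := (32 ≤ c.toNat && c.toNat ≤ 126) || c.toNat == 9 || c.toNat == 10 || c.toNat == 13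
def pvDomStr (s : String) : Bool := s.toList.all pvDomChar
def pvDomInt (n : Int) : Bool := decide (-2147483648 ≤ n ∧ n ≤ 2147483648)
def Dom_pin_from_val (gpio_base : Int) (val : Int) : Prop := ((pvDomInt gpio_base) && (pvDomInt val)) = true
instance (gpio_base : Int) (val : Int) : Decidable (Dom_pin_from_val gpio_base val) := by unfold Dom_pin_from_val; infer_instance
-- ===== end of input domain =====

set_option maxRecDepth 16384
set_option maxHeartbeats 2000000


-- B replaces A's 64-entry (base,mask)→name table and its 16-step index loop by a 4-entry
-- base→letter map plus a recursion over the binary representation of val & 0xFFFF (halving the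
-- remainder, stripping one bit per step, building the name list back-to-front) — objective: simpler.

-- shared helper: exact port of the f-string piece "{val:04X}" (uppercase hex of |val|,
-- '-' in front for negatives, zero-padded to total width 4 with the sign counting toward the width,
-- exactly as Python's format spec '04X' behaves; both Source A and Source B contain this very f-string).
def pvHexDigit (n : Nat) : Char :=
  ['0','1','2','3','4','5','6','7','8','9','A','B','C','D','E','F'].getD n '0'

def pvHexChars (n : Nat) : List Char :=
  if _h : n < 16 then [pvHexDigit n]
  else pvHexChars (n / 16) ++ [pvHexDigit (n % 16)]
decreasing_by exact Nat.div_lt_self (by omega) (by omega)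

def pvFmt04X (val : Int) : List Char :=
  let ds := pvHexChars val.natAbs
  if val < 0 then '-' :: List.replicate (3 - ds.length) '0' ++ ds
  else List.replicate (4 - ds.length) '0' ++ ds

-- ===== PORT A =====
def GPIO_PIN_NAMES : PySem.Dict (Int × Int) String := PySem.Dict.ofList [
    ((0x40010800, 0x1), "PA0"),
    ((0x40010800, 0x2), "PA1"),
    ((0x40010800, 0x4), "PA2"),
    ((0x40010800, 0x8), "PA3"),
    ((0x40010800, 0x10), "PA4"),
    ((0x40010800, 0x20), "PA5"),
    ((0x40010800, 0x40), "PA6"),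
    ((0x40010800, 0x80), "PA7"),
    ((0x40010800, 0x100), "PA8"),
    ((0x40010800, 0x200), "PA9"),
    ((0x40010800, 0x400), "PA10"),
    ((0x40010800, 0x800), "PA11"),
    ((0x40010800, 0x1000), "PA12"),
    ((0x40010800, 0x2000), "PA13"),
    ((0x40010800, 0x4000), "PA14"),
    ((0x40010800, 0x8000), "PA15"),
    ((0x40010c00, 0x1), "PB0"),
    ((0x40010c00, 0x2), "PB1"),
    ((0x40010c00, 0x4), "PB2"),
    ((0x40010c00, 0x8), "PB3"),
    ((0x40010c00, 0x10), "PB4"),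
    ((0x40010c00, 0x20), "PB5"),
    ((0x40010c00, 0x40), "PB6"),
    ((0x40010c00, 0x80), "PB7"),
    ((0x40010c00, 0x100), "PB8"),
    ((0x40010c00, 0x200), "PB9"),
    ((0x40010c00, 0x400), "PB10"),
    ((0x40010c00, 0x800), "PB11"),
    ((0x40010c00, 0x1000), "PB12"),
    ((0x40010c00, 0x2000), "PB13"),
    ((0x40010c00, 0x4000), "PB14"),
    ((0x40010c00, 0x8000), "PB15"),
    ((0x40011000, 0x1), "PC0"),
    ((0x40011000, 0x2), "PC1"),
    ((0x40011000, 0x4), "PC2"),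
    ((0x40011000, 0x8), "PC3"),
    ((0x40011000, 0x10), "PC4"),
    ((0x40011000, 0x20), "PC5"),
    ((0x40011000, 0x40), "PC6"),
    ((0x40011000, 0x80), "PC7"),
    ((0x40011000, 0x100), "PC8"),
    ((0x40011000, 0x200), "PC9"),
    ((0x40011000, 0x400), "PC10"),
    ((0x40011000, 0x800), "PC11"),
    ((0x40011000, 0x1000), "PC12"),
    ((0x40011000, 0x2000), "PC13"),
    ((0x40011000, 0x4000), "PC14"),
    ((0x40011000, 0x8000), "PC15"),
    ((0x40011400, 0x1), "PD0"),
    ((0x40011400, 0x2), "PD1"),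
    ((0x40011400, 0x4), "PD2"),
    ((0x40011400, 0x8), "PD3"),
    ((0x40011400, 0x10), "PD4"),
    ((0x40011400, 0x20), "PD5"),
    ((0x40011400, 0x40), "PD6"),
    ((0x40011400, 0x80), "PD7"),
    ((0x40011400, 0x100), "PD8"),
    ((0x40011400, 0x200), "PD9"),
    ((0x40011400, 0x400), "PD10"),
    ((0x40011400, 0x800), "PD11"),
    ((0x40011400, 0x1000), "PD12"),
    ((0x40011400, 0x2000), "PD13"),
    ((0x40011400, 0x4000), "PD14"),
    ((0x40011400, 0x8000), "PD15"),
  ]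

def pin_from_val (gpio_base : Int) (val : Int) : String :=
  let key : Int × Int := (gpio_base, val)
  if GPIO_PIN_NAMES.contains key then GPIO_PIN_NAMES.getD key ""
  else
    let pins : List String := (PySem.List.pyRange 0 16 1).foldl (fun pins bit =>
      if PySem.Int.band val ((1 : Int) <<< bit.toNat) ≠ 0 then
        let k : Int × Int := (gpio_base, (1 : Int) <<< bit.toNat)
        if GPIO_PIN_NAMES.contains k then pins ++ [GPIO_PIN_NAMES.getD k ""] else pins
      else pins) []
    if pins ≠ [] then PySem.Str.join "|" pins
    else String.ofList ("pin_mask=0x".toList ++ pvFmt04X val)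

-- ===== PORT B =====
def GPIO_PORT_LETTERS : PySem.Dict Int String := PySem.Dict.ofList
  [(0x40010800, "A"), (0x40010C00, "B"), (0x40011000, "C"), (0x40011400, "D")]

-- the inner 'def go(rem, bit)' of Source B; rem = val & 0xFFFF is a nonnegative Python int,
-- so carrying it as a Nat is exact ('rem >> 1' = /2, 'rem & 1' = %2, 'rem == 0' truthiness test)
def goB (letter : List Char) (rem : Nat) (bit : Nat) : List String :=
  if h : rem = 0 then []  -- 'h' is cited by the decreasing_by termination proof
  else
    let rest := goB letter (rem / 2) (bit + 1)
    if rem % 2 = 1 then String.ofList ('P' :: letter ++ PySem.Int.toChars (Int.ofNat bit)) :: rest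
    else rest
decreasing_by exact Nat.div_lt_self (Nat.pos_of_ne_zero h) (by omega)

def pin_from_val_alt (gpio_base : Int) (val : Int) : String :=
  match GPIO_PORT_LETTERS.get? gpio_base with
  | none => String.ofList ("pin_mask=0x".toList ++ pvFmt04X val)
  | some letter =>
    let pins : List String := goB letter.toList (PySem.Int.band val 65535).toNat 0
    if pins ≠ [] then PySem.Str.join "|" pins
    else String.ofList ("pin_mask=0x".toList ++ pvFmt04X val)

-- ===== PRECONDITION & SPEC =====
def Spec_pin_from_val (gpio_base : Int) (val : Int) (out : String) : Prop := out = pin_from_val_alt gpio_base val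
instance (gpio_base : Int) (val : Int) (out : String) : Decidable (Spec_pin_from_val gpio_base val out) := by unfold Spec_pin_from_val; infer_instance

-- ===== CLAIM (what is proved, stated in full; the proofs are below) =====
def Claim_equal_pin_from_val : Prop := ∀ (gpio_base : Int) (val : Int), Dom_pin_from_val gpio_base val → Spec_pin_from_val gpio_base val (pin_from_val gpio_base val)

-- ===== LEMMAS AND PROOFS =====

-- proof-side middle form: A's bit loop with the names written arithmetically
def pvName (Lc : List Char) (k : Nat) : String :=
  String.ofList ('P' :: Lc ++ PySem.Int.toChars (Int.ofNat k))

def pvFold (Lc : List Char) (v : Int) : List String :=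
  (List.range' 0 16).foldl (fun pins (k : Nat) =>
    if PySem.Int.band v ((1 : Int) <<< k) ≠ 0 then pins ++ [pvName Lc k] else pins) []

def pvRes (Lc : List Char) (v : Int) : String :=
  if pvFold Lc v ≠ [] then PySem.Str.join "|" (pvFold Lc v)
  else String.ofList ("pin_mask=0x".toList ++ pvFmt04X v)

-- the low 16 bits of v, matching PySem.Int.band v 65535 branch by branch
def pvLow16 (v : Int) : Nat :=
  if 0 ≤ v then v.toNat &&& 65535 else 65535 - (65535 &&& (-v - 1).toNat)

theorem pvBand65535 (v : Int) : PySem.Int.band v 65535 = ((pvLow16 v : Nat) : Int) := by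
  unfold PySem.Int.band pvLow16
  split_ifs with h h2 h3
  · rfl
  · exact absurd (by norm_num) h2
  · rfl
  · exact absurd (by norm_num) h3

theorem pvLow16_lt (v : Int) : pvLow16 v < 65536 := by
  unfold pvLow16
  split_ifs with h
  · have := Nat.and_le_right (n := v.toNat) (m := 65535); omega
  · omega

theorem pvShiftPow (i : Nat) (h : i < 16) : ((1 : Int) <<< i) = ((2 ^ i : Nat) : Int) := by
  interval_cases i <;> decide

theorem pvTestBit65535 (i : Nat) (h : i < 16) : Nat.testBit 65535 i = true := by
  have : (65535 : Nat) = 2 ^ 16 - 1 := by norm_num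
  rw [this, Nat.testBit_two_pow_sub_one]
  simpa using h

theorem pvBridge (v : Int) (i : Nat) (h : i < 16) :
    (PySem.Int.band v ((1 : Int) <<< i) ≠ 0) ↔ (pvLow16 v).testBit i = true := by
  rw [pvShiftPow i h]
  unfold pvLow16
  by_cases hv : 0 ≤ v
  · rw [if_pos hv, PySem.Int.band_of_nonneg hv (by positivity), Int.toNat_natCast]
    rw [ne_eq, Int.natCast_eq_zero]
    rw [Nat.testBit_land, pvTestBit65535 i h, Bool.and_true]
    rw [Nat.and_two_pow]
    simp
  · rw [if_neg hv]
    set m := (-v - 1).toNat with hm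
    have hband : PySem.Int.band v ((2 ^ i : Nat) : Int) = ((2 ^ i - (2 ^ i &&& m) : Nat) : Int) := by
      unfold PySem.Int.band
      rw [if_neg hv, if_pos (by positivity), Int.toNat_natCast]
    rw [hband, ne_eq, Int.natCast_eq_zero]
    have hy : (65535 &&& m) ≤ 65535 := Nat.and_le_left
    have hsub : 65535 - (65535 &&& m) = 2 ^ 16 - ((65535 &&& m) + 1) := by omega
    rw [hsub, Nat.testBit_two_pow_sub_succ (by omega)]
    rw [Nat.testBit_land, pvTestBit65535 i h]
    rw [Nat.and_comm (2 ^ i) m, Nat.and_two_pow]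
    cases hb : m.testBit i <;> simp [h]

theorem goB_zero (Lc : List Char) (b : Nat) : goB Lc 0 b = [] := by
  rw [goB]; simp

theorem goB_ne (Lc : List Char) (r b : Nat) (h : r ≠ 0) :
    goB Lc r b = if r % 2 = 1
      then String.ofList ('P' :: Lc ++ PySem.Int.toChars (Int.ofNat b)) :: goB Lc (r / 2) (b + 1)
      else goB Lc (r / 2) (b + 1) := by
  rw [goB]; simp [h]

-- A's bit loop (arithmetic-name form) computes exactly B's binary-representation recursion
theorem pvFoldEqGo (Lc : List Char) (v : Int) :
    ∀ (n : Nat) (b : Nat) (r : Nat) (pins0 : List String), r < 2 ^ n →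
    (∀ i, i < n → ((PySem.Int.band v ((1 : Int) <<< (b + i)) ≠ 0) ↔ r.testBit i = true)) →
    (List.range' b n).foldl (fun pins (k : Nat) =>
      if PySem.Int.band v ((1 : Int) <<< k) ≠ 0 then pins ++ [pvName Lc k] else pins) pins0
    = pins0 ++ goB Lc r b := by
  intro n
  induction n with
  | zero =>
    intro b r pins0 hr _
    have h0 : r = 0 := by rw [pow_zero] at hr; omega
    subst h0
    simp [goB_zero]
  | succ n ih =>
    intro b r pins0 hr hc
    rw [List.range'_succ, List.foldl_cons]
    have hb0 : (PySem.Int.band v ((1 : Int) <<< b) ≠ 0) ↔ r.testBit 0 = true := by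
      have := hc 0 (by omega); simpa using this
    have hr' : r / 2 < 2 ^ n := by
      rw [Nat.div_lt_iff_lt_mul (by norm_num)]
      calc r < 2 ^ (n + 1) := hr
        _ = 2 ^ n * 2 := by ring
    have hc' : ∀ i, i < n → ((PySem.Int.band v ((1 : Int) <<< (b + 1 + i)) ≠ 0) ↔ (r / 2).testBit i = true) := by
      intro i hi
      have h1 := hc (i + 1) (by omega)
      rw [show b + (i + 1) = b + 1 + i by omega] at h1
      rw [h1, Nat.testBit_succ]
    rw [ih (b + 1) (r / 2) _ hr' hc']
    by_cases hrz : r = 0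
    · subst hrz
      rw [goB_zero, goB_zero]
      have : ¬ (PySem.Int.band v ((1 : Int) <<< b) ≠ 0) := by
        rw [hb0]; simp
      rw [if_neg this]
    · rw [goB_ne Lc r b hrz]
      rw [Nat.testBit_zero] at hb0
      by_cases h2 : r % 2 = 1
      · rw [if_pos h2, if_pos (hb0.mpr (by simpa using h2))]
        simp [pvName]
      · rw [if_neg h2, if_neg (by rw [hb0]; simpa using h2)]

-- B's port equals the middle form for each known base
theorem pvAltEq (g v : Int) (Lc : List Char)
    (hl : GPIO_PORT_LETTERS.get? g = some (String.ofList Lc)) :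
    pin_from_val_alt g v = pvRes (String.ofList Lc).toList v := by
  unfold pin_from_val_alt
  rw [hl]
  dsimp only
  have hpins : goB (String.ofList Lc).toList (PySem.Int.band v 65535).toNat 0
      = pvFold (String.ofList Lc).toList v := by
    rw [pvBand65535, Int.toNat_natCast]
    have := pvFoldEqGo (String.ofList Lc).toList v 16 0 (pvLow16 v) [] (pvLow16_lt v)
      (by intro i hi; rw [Nat.zero_add]; exact pvBridge v i hi)
    rw [pvFold, this, List.nil_append]
  rw [hpins, pvRes]

-- the table, re-stated as a literal Dict.mk so contains/get? unfold entry by entry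
theorem pvDictMk : GPIO_PIN_NAMES = PySem.Dict.mk [
    ((0x40010800, 0x1), "PA0"),
    ((0x40010800, 0x2), "PA1"),
    ((0x40010800, 0x4), "PA2"),
    ((0x40010800, 0x8), "PA3"),
    ((0x40010800, 0x10), "PA4"),
    ((0x40010800, 0x20), "PA5"),
    ((0x40010800, 0x40), "PA6"),
    ((0x40010800, 0x80), "PA7"),
    ((0x40010800, 0x100), "PA8"),
    ((0x40010800, 0x200), "PA9"),
    ((0x40010800, 0x400), "PA10"),
    ((0x40010800, 0x800), "PA11"),
    ((0x40010800, 0x1000), "PA12"),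
    ((0x40010800, 0x2000), "PA13"),
    ((0x40010800, 0x4000), "PA14"),
    ((0x40010800, 0x8000), "PA15"),
    ((0x40010c00, 0x1), "PB0"),
    ((0x40010c00, 0x2), "PB1"),
    ((0x40010c00, 0x4), "PB2"),
    ((0x40010c00, 0x8), "PB3"),
    ((0x40010c00, 0x10), "PB4"),
    ((0x40010c00, 0x20), "PB5"),
    ((0x40010c00, 0x40), "PB6"),
    ((0x40010c00, 0x80), "PB7"),
    ((0x40010c00, 0x100), "PB8"),
    ((0x40010c00, 0x200), "PB9"),
    ((0x40010c00, 0x400), "PB10"),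
    ((0x40010c00, 0x800), "PB11"),
    ((0x40010c00, 0x1000), "PB12"),
    ((0x40010c00, 0x2000), "PB13"),
    ((0x40010c00, 0x4000), "PB14"),
    ((0x40010c00, 0x8000), "PB15"),
    ((0x40011000, 0x1), "PC0"),
    ((0x40011000, 0x2), "PC1"),
    ((0x40011000, 0x4), "PC2"),
    ((0x40011000, 0x8), "PC3"),
    ((0x40011000, 0x10), "PC4"),
    ((0x40011000, 0x20), "PC5"),
    ((0x40011000, 0x40), "PC6"),
    ((0x40011000, 0x80), "PC7"),
    ((0x40011000, 0x100), "PC8"),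
    ((0x40011000, 0x200), "PC9"),
    ((0x40011000, 0x400), "PC10"),
    ((0x40011000, 0x800), "PC11"),
    ((0x40011000, 0x1000), "PC12"),
    ((0x40011000, 0x2000), "PC13"),
    ((0x40011000, 0x4000), "PC14"),
    ((0x40011000, 0x8000), "PC15"),
    ((0x40011400, 0x1), "PD0"),
    ((0x40011400, 0x2), "PD1"),
    ((0x40011400, 0x4), "PD2"),
    ((0x40011400, 0x8), "PD3"),
    ((0x40011400, 0x10), "PD4"),
    ((0x40011400, 0x20), "PD5"),
    ((0x40011400, 0x40), "PD6"),
    ((0x40011400, 0x80), "PD7"),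
    ((0x40011400, 0x100), "PD8"),
    ((0x40011400, 0x200), "PD9"),
    ((0x40011400, 0x400), "PD10"),
    ((0x40011400, 0x800), "PD11"),
    ((0x40011400, 0x1000), "PD12"),
    ((0x40011400, 0x2000), "PD13"),
    ((0x40011400, 0x4000), "PD14"),
    ((0x40011400, 0x8000), "PD15"),
  ] := by decide

-- A's port equals the middle form for each known base
theorem pvAEq_A (v : Int) : pin_from_val 0x40010800 v = pvRes "A".toList v := by
  by_cases hc : GPIO_PIN_NAMES.contains ((0x40010800 : Int), v) = true
  · rw [pvDictMk] at hc
    simp only [PySem.Dict.contains_mk] at hc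
    simp at hc
    rcases hc with rfl|rfl|rfl|rfl|rfl|rfl|rfl|rfl|rfl|rfl|rfl|rfl|rfl|rfl|rfl|rfl <;> decide
  · have hc' : GPIO_PIN_NAMES.contains ((0x40010800 : Int), v) = false := by simpa using hc
    simp only [pin_from_val, hc', Bool.false_eq_true, if_false]
    rw [PySem.List.pyRange_one]
    simp only [List.foldl_map, zero_add, Int.toNat_natCast, show ((16:Int) - 0).toNat = 16 from rfl]
    rw [List.range_eq_range']
    rw [PySem.List.foldl_congr_mem _ _ (fun pins (k : Nat) =>
        if PySem.Int.band v ((1 : Int) <<< k) ≠ 0 then pins ++ [pvName "A".toList k] else pins) []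
      (by
        intro acc k hk
        have hk' : k ∈ List.range 16 := by rwa [List.range_eq_range']
        rw [List.mem_range] at hk'
        interval_cases k <;>
          (refine if_congr Iff.rfl ?_ rfl
           rw [if_pos (by decide)]
           exact congrArg (fun s => acc ++ [s]) (by decide)))]
    rfl

theorem pvAEq_B (v : Int) : pin_from_val 0x40010c00 v = pvRes "B".toList v := by
  by_cases hc : GPIO_PIN_NAMES.contains ((0x40010c00 : Int), v) = true
  · rw [pvDictMk] at hc
    simp only [PySem.Dict.contains_mk] at hc
    simp at hc
    rcases hc with rfl|rfl|rfl|rfl|rfl|rfl|rfl|rfl|rfl|rfl|rfl|rfl|rfl|rfl|rfl|rfl <;> decide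
  · have hc' : GPIO_PIN_NAMES.contains ((0x40010c00 : Int), v) = false := by simpa using hc
    simp only [pin_from_val, hc', Bool.false_eq_true, if_false]
    rw [PySem.List.pyRange_one]
    simp only [List.foldl_map, zero_add, Int.toNat_natCast, show ((16:Int) - 0).toNat = 16 from rfl]
    rw [List.range_eq_range']
    rw [PySem.List.foldl_congr_mem _ _ (fun pins (k : Nat) =>
        if PySem.Int.band v ((1 : Int) <<< k) ≠ 0 then pins ++ [pvName "B".toList k] else pins) []
      (by
        intro acc k hk
        have hk' : k ∈ List.range 16 := by rwa [List.range_eq_range']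
        rw [List.mem_range] at hk'
        interval_cases k <;>
          (refine if_congr Iff.rfl ?_ rfl
           rw [if_pos (by decide)]
           exact congrArg (fun s => acc ++ [s]) (by decide)))]
    rfl

theorem pvAEq_C (v : Int) : pin_from_val 0x40011000 v = pvRes "C".toList v := by
  by_cases hc : GPIO_PIN_NAMES.contains ((0x40011000 : Int), v) = true
  · rw [pvDictMk] at hc
    simp only [PySem.Dict.contains_mk] at hc
    simp at hc
    rcases hc with rfl|rfl|rfl|rfl|rfl|rfl|rfl|rfl|rfl|rfl|rfl|rfl|rfl|rfl|rfl|rfl <;> decide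
  · have hc' : GPIO_PIN_NAMES.contains ((0x40011000 : Int), v) = false := by simpa using hc
    simp only [pin_from_val, hc', Bool.false_eq_true, if_false]
    rw [PySem.List.pyRange_one]
    simp only [List.foldl_map, zero_add, Int.toNat_natCast, show ((16:Int) - 0).toNat = 16 from rfl]
    rw [List.range_eq_range']
    rw [PySem.List.foldl_congr_mem _ _ (fun pins (k : Nat) =>
        if PySem.Int.band v ((1 : Int) <<< k) ≠ 0 then pins ++ [pvName "C".toList k] else pins) []
      (by
        intro acc k hk
        have hk' : k ∈ List.range 16 := by rwa [List.range_eq_range']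
        rw [List.mem_range] at hk'
        interval_cases k <;>
          (refine if_congr Iff.rfl ?_ rfl
           rw [if_pos (by decide)]
           exact congrArg (fun s => acc ++ [s]) (by decide)))]
    rfl

theorem pvAEq_D (v : Int) : pin_from_val 0x40011400 v = pvRes "D".toList v := by
  by_cases hc : GPIO_PIN_NAMES.contains ((0x40011400 : Int), v) = true
  · rw [pvDictMk] at hc
    simp only [PySem.Dict.contains_mk] at hc
    simp at hc
    rcases hc with rfl|rfl|rfl|rfl|rfl|rfl|rfl|rfl|rfl|rfl|rfl|rfl|rfl|rfl|rfl|rfl <;> decide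
  · have hc' : GPIO_PIN_NAMES.contains ((0x40011400 : Int), v) = false := by simpa using hc
    simp only [pin_from_val, hc', Bool.false_eq_true, if_false]
    rw [PySem.List.pyRange_one]
    simp only [List.foldl_map, zero_add, Int.toNat_natCast, show ((16:Int) - 0).toNat = 16 from rfl]
    rw [List.range_eq_range']
    rw [PySem.List.foldl_congr_mem _ _ (fun pins (k : Nat) =>
        if PySem.Int.band v ((1 : Int) <<< k) ≠ 0 then pins ++ [pvName "D".toList k] else pins) []
      (by
        intro acc k hk
        have hk' : k ∈ List.range 16 := by rwa [List.range_eq_range']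
        rw [List.mem_range] at hk'
        interval_cases k <;>
          (refine if_congr Iff.rfl ?_ rfl
           rw [if_pos (by decide)]
           exact congrArg (fun s => acc ++ [s]) (by decide)))]
    rfl

theorem pv_unknown (g v : Int)
    (h1 : g ≠ 0x40010800) (h2 : g ≠ 0x40010C00) (h3 : g ≠ 0x40011000) (h4 : g ≠ 0x40011400) :
    pin_from_val g v = pin_from_val_alt g v := by
  have hc : ∀ w : Int, GPIO_PIN_NAMES.contains (g, w) = false := by
    intro w
    rw [pvDictMk]
    simp only [PySem.Dict.contains_mk]
    simp
    omega
  have hl : GPIO_PORT_LETTERS.get? g = none := by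
    have hd : GPIO_PORT_LETTERS = PySem.Dict.mk
        [(0x40010800, "A"), (0x40010C00, "B"), (0x40011000, "C"), (0x40011400, "D")] := by decide
    rw [hd]
    simp [Ne.symm h1, Ne.symm h2, Ne.symm h3, Ne.symm h4, PySem.Dict.get?]
  simp only [pin_from_val, pin_from_val_alt, hc, hl, Bool.false_eq_true, if_false, ite_self]
  rw [PySem.List.foldl_congr_mem _ _ (fun (a : List String) (_ : Int) => a) []
    (by intro acc bit _; simp)]
  simp

-- ===== VERDICT (by name: the statement is the Claim_ definition above) =====
theorem pin_from_val_spec : Claim_equal_pin_from_val := by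
  intro g v _
  unfold Spec_pin_from_val
  by_cases h1 : g = 0x40010800
  · subst h1
    rw [pvAEq_A v, pvAltEq _ v "A".toList (by decide)]
    rfl
  by_cases h2 : g = 0x40010C00
  · subst h2
    rw [pvAEq_B v, pvAltEq _ v "B".toList (by decide)]
    rfl
  by_cases h3 : g = 0x40011000
  · subst h3
    rw [pvAEq_C v, pvAltEq _ v "C".toList (by decide)]
    rfl
  by_cases h4 : g = 0x40011400
  · subst h4
    rw [pvAEq_D v, pvAltEq _ v "D".toList (by decide)]
    rfl
  exact pv_unknown g v h1 h2 h3 h4
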